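-- pv_equiv track=rewrite | github.com/ntbanit/codility_study | lesson_10/_coin.py | coins_brute
-- ===== SOURCE A (Python) =====
-- def coins_brute(n: int) -> int:
--     """O(n log n) simulation for correctness checking."""
--     coin = [0] * (n + 1)
--     for i in range(1, n + 1):
--         k = i
--         while k <= n:
--             coin[k] ^= 1   # flip (same as (coin[k] + 1) % 2 but faster)
--             k += i
--     return sum(coin[1:])
-- ===== SOURCE B (Python) =====
-- def coins_brute(n: int) -> int:
--     """Coin k ends heads-up iff k has an odd number of divisors, i.e. k is a
--     perfect square; so the answer is the number of perfect squares in 1..n,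
--     which is floor(sqrt(n)) (0 for n <= 0)."""
--     r = 0
--     while (r + 1) * (r + 1) <= n:
--         r += 1
--     return r
-- ===== Notes on version B (the rewrite author's own statement) =====
-- stated objective: faster
-- what changed: Replaces the full O(n log n) harmonic toggle simulation with a direct computation of floor(sqrt(n)) (coins left heads-up are exactly the perfect-square positions), found by a simple O(sqrt(n)) incrementing loop.
import Mathlib
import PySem

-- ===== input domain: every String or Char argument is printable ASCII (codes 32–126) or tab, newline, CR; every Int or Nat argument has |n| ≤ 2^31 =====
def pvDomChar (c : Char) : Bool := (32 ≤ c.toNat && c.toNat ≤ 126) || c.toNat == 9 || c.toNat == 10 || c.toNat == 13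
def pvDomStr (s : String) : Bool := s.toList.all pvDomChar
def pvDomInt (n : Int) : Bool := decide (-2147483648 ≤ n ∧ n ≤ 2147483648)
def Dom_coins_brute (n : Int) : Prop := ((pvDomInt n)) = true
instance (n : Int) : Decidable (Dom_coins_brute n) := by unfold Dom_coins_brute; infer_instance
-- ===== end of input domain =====

-- B replaces A's toggle simulation of all the coins by computing floor(sqrt(n)) with a
-- simple increment loop: only the perfect-square positions end heads-up.

-- ===== PORT A =====
-- inner `while k <= n: coin[k] ^= 1; k += i` loop; the entries stay in {0,1}, so
-- `coin[k] ^= 1` is exactly `coin[k] = 1 - coin[k]`; k is always ≥ 1 and ≤ n, so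
-- coin[k] is a nonnegative in-range index. The `1 ≤ i` conjunct is a termination
-- guard only: every i produced by range(1, n+1) satisfies it.
def pvFlipRun (n i k : Int) (coin : Array Int) : Array Int :=
  if _h : k ≤ n ∧ 1 ≤ i then
    pvFlipRun n i (k + i) (coin.setIfInBounds k.toNat (1 - coin.getD k.toNat 0))
  else coin
termination_by (n + 1 - k).toNat
decreasing_by omega

def coins_brute (n : Int) : Int :=
  -- coin = [0] * (n + 1)
  let coin : Array Int := Array.replicate (n + 1).toNat 0
  -- for i in range(1, n + 1): k = i; while k <= n: coin[k] ^= 1; k += i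
  let final := (PySem.List.pyRange 1 (n + 1) 1).foldl (fun c i => pvFlipRun n i i c) coin
  -- return sum(coin[1:])
  (PySem.List.slice final.toList (some 1) none).sum

-- ===== PORT B =====
-- `r = 0; while (r+1)*(r+1) <= n: r += 1; return r` — the fuel n.toNat is a
-- termination device only: the loop body runs at most n times.
def pvSqrtLoop (n : Int) : Nat → Int → Int
  | 0, r => r
  | fuel + 1, r => if (r + 1) * (r + 1) ≤ n then pvSqrtLoop n fuel (r + 1) else r

def coins_brute_alt (n : Int) : Int := pvSqrtLoop n n.toNat 0

-- ===== PRECONDITION & SPEC =====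
def Spec_coins_brute (n : Int) (out : Int) : Prop := out = coins_brute_alt n
instance (n : Int) (out : Int) : Decidable (Spec_coins_brute n out) := by unfold Spec_coins_brute; infer_instance

-- ===== CLAIM (what is proved, stated in full; the proofs are below) =====
def Claim_equal_coins_brute : Prop := ∀ (n : Int), Dom_coins_brute n → Spec_coins_brute n (coins_brute n)

-- ===== LEMMAS AND PROOFS =====

-- ---- B side: the loop computes Nat.sqrt ----
theorem pvSqrtLoop_eq_sqrt (n : Int) (fuel : Nat) (r : Nat)
    (hr : (r : Int) * r ≤ n) (hfuel : Nat.sqrt n.toNat ≤ r + fuel) :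
    pvSqrtLoop n fuel r = (Nat.sqrt n.toNat : Int) := by
  have hn : 0 ≤ n := le_trans (by positivity) hr
  induction fuel generalizing r with
  | zero =>
    have hcast : ((r * r : Nat) : Int) = (r : Int) * r := by push_cast; ring
    have h2 : r ≤ Nat.sqrt n.toNat := Nat.le_sqrt.2 (by omega)
    simp only [pvSqrtLoop]
    omega
  | succ fuel ih =>
    simp only [pvSqrtLoop]
    split
    · rename_i hlt
      have hstep : (((r + 1 : Nat) : Int)) * ((r + 1 : Nat) : Int) ≤ n := by push_cast; linarith
      have := ih (r + 1) hstep (by omega)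
      simpa using this
    · rename_i hge
      have hcast : (((r + 1) * (r + 1) : Nat) : Int) = ((r : Int) + 1) * ((r : Int) + 1) := by push_cast; ring
      have hlt' : n < ((r : Int) + 1) * ((r : Int) + 1) := by omega
      have h2 : Nat.sqrt n.toNat < r + 1 := Nat.sqrt_lt.2 (by omega)
      have hcast2 : ((r * r : Nat) : Int) = (r : Int) * r := by push_cast; ring
      have h1 : r ≤ Nat.sqrt n.toNat := Nat.le_sqrt.2 (by omega)
      omega

theorem alt_eq_sqrt (n : Int) : coins_brute_alt n = (Nat.sqrt n.toNat : Int) := by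
  rcases le_or_gt n 0 with h | h
  · have h0 : n.toNat = 0 := by omega
    simp [coins_brute_alt, h0, pvSqrtLoop]
  · exact pvSqrtLoop_eq_sqrt n n.toNat 0 (by simpa using le_of_lt h)
      (by simpa using Nat.sqrt_le_self n.toNat)

-- ---- A side: effect of one inner run on one position ----
theorem pvFlipRun_size (n i k : Int) (coin : Array Int) :
    (pvFlipRun n i k coin).size = coin.size := by
  induction k, coin using pvFlipRun.induct n i with
  | case1 k coin h ih => rw [pvFlipRun]; simp only [dif_pos h]; simpa using ih
  | case2 k coin h => rw [pvFlipRun]; simp only [dif_neg h]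

theorem pvFlipRun_getD (n i k : Int) (coin : Array Int) (hi : 1 ≤ i) (hk : 1 ≤ k)
    (j : Nat) (hj : j < coin.size) :
    (pvFlipRun n i k coin).getD j 0 =
      if k ≤ (j : Int) ∧ (j : Int) ≤ n ∧ i ∣ ((j : Int) - k) then 1 - coin.getD j 0
      else coin.getD j 0 := by
  induction k, coin using pvFlipRun.induct n i with
  | case1 k coin h ih =>
    rw [pvFlipRun]
    simp only [dif_pos h]
    rw [ih (by omega) (by simpa using hj)]
    by_cases hE : (j : Int) = k
    · have hjk : j = k.toNat := by omega
      have hC' : ¬(k + i ≤ (j : Int) ∧ (j : Int) ≤ n ∧ i ∣ ((j : Int) - (k + i))) := by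
        rintro ⟨h1, -, -⟩; omega
      rw [if_neg hC', if_pos ⟨by omega, by omega, by simp [hE]⟩]
      subst hjk
      rw [Array.getD_eq_getD_getElem?, Array.getElem?_setIfInBounds_self, if_pos (by simpa using hj)]
      rfl
    · have hgd : (coin.setIfInBounds k.toNat (1 - coin.getD k.toNat 0)).getD j 0 = coin.getD j 0 := by
        rw [Array.getD_eq_getD_getElem?, Array.getElem?_setIfInBounds_ne (by omega), ← Array.getD_eq_getD_getElem?]
      rw [hgd]
      have hcond : (k + i ≤ (j : Int) ∧ (j : Int) ≤ n ∧ i ∣ ((j : Int) - (k + i)))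
          ↔ (k ≤ (j : Int) ∧ (j : Int) ≤ n ∧ i ∣ ((j : Int) - k)) := by
        constructor
        · rintro ⟨h1, h2, h3⟩
          refine ⟨by omega, h2, ?_⟩
          have he : (j : Int) - k = ((j : Int) - (k + i)) + i := by ring
          rw [he]; exact dvd_add h3 (dvd_refl i)
        · rintro ⟨h1, h2, h3⟩
          have hpos : 0 < (j : Int) - k := by omega
          have hle : i ≤ (j : Int) - k := Int.le_of_dvd hpos h3
          refine ⟨by omega, h2, ?_⟩
          have he : (j : Int) - (k + i) = ((j : Int) - k) - i := by ring
          rw [he]; exact dvd_sub h3 (dvd_refl i)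
      rw [if_congr hcond rfl rfl]
  | case2 k coin h =>
    rw [pvFlipRun]
    simp only [dif_neg h]
    have hcond : ¬(k ≤ (j : Int) ∧ (j : Int) ≤ n ∧ i ∣ ((j : Int) - k)) := by
      rintro ⟨h1, h2, -⟩
      exact h ⟨by omega, hi⟩
    rw [if_neg hcond]

-- ---- A side: the outer fold flips position j once per matching i ----
theorem foldl_flip_size (n : Int) (is : List Int) (coin : Array Int) :
    (is.foldl (fun c i => pvFlipRun n i i c) coin).size = coin.size := by
  induction is generalizing coin with
  | nil => rfl
  | cons a is ih => simp only [List.foldl_cons]; rw [ih, pvFlipRun_size]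

theorem foldl_flip_getD (n : Int) (is : List Int) (coin : Array Int)
    (h1 : ∀ i ∈ is, 1 ≤ i) (j : Nat) (hj : j < coin.size) :
    (is.foldl (fun c i => pvFlipRun n i i c) coin).getD j 0 =
      if Odd (is.countP (fun i => decide (i ≤ (j : Int) ∧ (j : Int) ≤ n ∧ i ∣ ((j : Int) - i))))
      then 1 - coin.getD j 0 else coin.getD j 0 := by
  induction is generalizing coin with
  | nil => simp
  | cons a is ih =>
    have ha : 1 ≤ a := h1 a (by simp)
    have hlen : j < (pvFlipRun n a a coin).size := by rw [pvFlipRun_size]; exact hj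
    simp only [List.foldl_cons]
    rw [ih _ (fun i hi => h1 i (List.mem_cons_of_mem _ hi)) hlen]
    rw [pvFlipRun_getD n a a coin ha ha j hj]
    rw [List.countP_cons]
    by_cases hc : a ≤ (j : Int) ∧ (j : Int) ≤ n ∧ a ∣ ((j : Int) - a)
    · have hd : (decide (a ≤ (j : Int) ∧ (j : Int) ≤ n ∧ a ∣ ((j : Int) - a))) = true := by
        simpa using hc
      rw [if_pos hc, hd, if_pos rfl]
      generalize (List.countP (fun i => decide (i ≤ (j : Int) ∧ (j : Int) ≤ n ∧ i ∣ ((j : Int) - i))) is) = c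
      rcases Nat.even_or_odd c with he | ho
      · rw [if_neg (Nat.not_odd_iff_even.2 he),
            if_pos (by rcases he with ⟨m, hm⟩; exact ⟨m, by omega⟩)]
      · rw [if_pos ho, if_neg (by rcases ho with ⟨m, hm⟩; rw [Nat.odd_iff]; omega)]
        ring
    · have hc' : ¬(a ≤ (j : Int) ∧ (j : Int) ≤ n ∧ a ∣ (j : Int)) := by
        rintro ⟨x, y, z⟩
        exact hc ⟨x, y, dvd_sub z (dvd_refl a)⟩
      simp [hc']

-- ---- counting bridges ----
theorem countP_range_eq_card_filter (m : Nat) (p : Nat → Prop) [DecidablePred p] :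
    (List.range m).countP (fun k => decide (p k)) = ((Finset.range m).filter p).card := by
  induction m with
  | zero => simp
  | succ m ih =>
    rw [List.range_succ, List.countP_append, Finset.range_add_one, Finset.filter_insert]
    by_cases h : p m
    · rw [if_pos h, Finset.card_insert_of_notMem (by simp)]
      simp [h, ih]
    · rw [if_neg h]
      simp [h, ih]

theorem card_filter_range_succ (N : Nat) (P : Nat → Prop) [DecidablePred P] :
    ((Finset.range N).filter (fun k => P (k + 1))).card
      = ((Finset.Icc 1 N).filter P).card := by
  rw [← Finset.card_image_of_injective _ (add_left_injective 1)]
  congr 1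
  ext i
  simp only [Finset.mem_image, Finset.mem_filter, Finset.mem_range, Finset.mem_Icc]
  constructor
  · rintro ⟨k, ⟨hk, hp⟩, rfl⟩; exact ⟨⟨by omega, by omega⟩, hp⟩
  · rintro ⟨⟨h1, h2⟩, hp⟩
    refine ⟨i - 1, ⟨by omega, ?_⟩, by omega⟩
    have he : i - 1 + 1 = i := by omega
    rw [he]; exact hp

theorem count_divisors (N j : Nat) (hj : 1 ≤ j) (hjN : j ≤ N) :
    ((Finset.Icc 1 N).filter (fun i => i ≤ j ∧ i ∣ j)).card = j.divisors.card := by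
  congr 1
  ext i
  simp only [Finset.mem_filter, Finset.mem_Icc, Nat.mem_divisors]
  constructor
  · rintro ⟨_, _, hd⟩; exact ⟨hd, by omega⟩
  · rintro ⟨hd, _⟩
    have hi1 : 1 ≤ i := Nat.pos_of_dvd_of_pos hd (by omega)
    have hij : i ≤ j := Nat.le_of_dvd (by omega) hd
    exact ⟨⟨hi1, le_trans hij hjN⟩, hij, hd⟩

-- ---- parity of the number of divisors: odd iff perfect square ----
theorem fixed_divisors (j : Nat) (hj : 1 ≤ j) :
    (j.divisors.filter (fun d => j / d = d)).card = if IsSquare j then 1 else 0 := by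
  split
  · rename_i hs
    obtain ⟨r, hr⟩ := hs
    have hr1 : 1 ≤ r := by nlinarith [hr]
    rw [Finset.card_eq_one]
    refine ⟨r, ?_⟩
    ext d
    simp only [Finset.mem_filter, Nat.mem_divisors, Finset.mem_singleton]
    constructor
    · rintro ⟨⟨hdvd, hne⟩, hdd⟩
      have hd0 : 0 < d := Nat.pos_of_dvd_of_pos hdvd (by omega)
      have hsq : d * d = j := by
        conv_rhs => rw [← Nat.div_mul_cancel hdvd]
        rw [hdd]
      nlinarith [hsq, hr]
    · intro hd
      rw [hd]
      have hdvd : r ∣ j := ⟨r, hr⟩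
      refine ⟨⟨hdvd, by omega⟩, ?_⟩
      rw [hr, Nat.mul_div_cancel_left r (by omega)]
  · rename_i hs
    rw [Finset.card_eq_zero]
    ext d
    simp only [Finset.mem_filter, Nat.mem_divisors, Finset.notMem_empty, iff_false]
    rintro ⟨⟨hdvd, hne⟩, hdd⟩
    refine hs ⟨d, ?_⟩
    conv_lhs => rw [← Nat.div_mul_cancel hdvd]
    rw [hdd]

theorem odd_card_divisors_iff (j : Nat) (hj : 1 ≤ j) :
    Odd j.divisors.card ↔ IsSquare j := by
  classical
  have h0 : j ≠ 0 := by omega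
  have hsum : ∑ _d ∈ j.divisors.filter (fun d => ¬ (j / d = d)), (1 : ZMod 2) = 0 := by
    apply Finset.sum_involution (fun d _ => j / d)
    · intro a ha; decide
    · intro a ha _
      simp only [Finset.mem_filter] at ha
      exact ha.2
    · intro a ha
      simp only [Finset.mem_filter, Nat.mem_divisors] at ha ⊢
      obtain ⟨⟨hdvd, -⟩, hne⟩ := ha
      have h1 : j / a ∣ j := Nat.div_dvd_of_dvd hdvd
      have h2 : j / (j / a) = a := Nat.div_div_self hdvd h0
      refine ⟨⟨h1, h0⟩, fun e => hne ?_⟩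
      conv_rhs => rw [← h2]
      exact e.symm
    · intro a ha
      simp only [Finset.mem_filter, Nat.mem_divisors] at ha
      exact Nat.div_div_self ha.1.1 h0
  have hz : ((j.divisors.card : Nat) : ZMod 2)
      = (((if IsSquare j then 1 else 0 : Nat)) : ZMod 2) := by
    rw [← Finset.card_filter_add_card_filter_not (s := j.divisors) (p := fun d => j / d = d)]
    push_cast
    rw [fixed_divisors j hj]
    have hnot : ((j.divisors.filter (fun d => ¬ (j / d = d))).card : ZMod 2) = 0 := by
      rw [Finset.card_eq_sum_ones]
      push_cast
      exact hsum
    rw [hnot, add_zero]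
    split <;> push_cast <;> rfl
  have hmod : j.divisors.card ≡ (if IsSquare j then 1 else 0) [MOD 2] :=
    (ZMod.natCast_eq_natCast_iff _ _ _).1 hz
  unfold Nat.ModEq at hmod
  rw [Nat.odd_iff]
  split at hmod <;> rename_i h <;> simp [h] <;> omega

-- ---- counting the perfect squares in 1..N ----
theorem card_squares_Icc (N : Nat) :
    ((Finset.Icc 1 N).filter (fun j => IsSquare j)).card = Nat.sqrt N := by
  classical
  have himg : (Finset.Icc 1 N).filter (fun j => IsSquare j)
      = (Finset.Icc 1 (Nat.sqrt N)).image (fun r => r * r) := by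
    ext j
    simp only [Finset.mem_filter, Finset.mem_Icc, Finset.mem_image]
    constructor
    · rintro ⟨⟨h1, h2⟩, r, hr⟩
      have hrr : j = r * r := by rw [hr]
      exact ⟨r, ⟨by nlinarith, Nat.le_sqrt.2 (by omega)⟩, hrr.symm⟩
    · rintro ⟨r, ⟨hr1, hr2⟩, rfl⟩
      have hrN := Nat.le_sqrt.1 hr2
      exact ⟨⟨by nlinarith, hrN⟩, r, rfl⟩
  rw [himg, Finset.card_image_of_injective _
    (fun a b h => Nat.mul_self_inj.1 h : Function.Injective (fun r : Nat => r * r))]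
  simp

-- ---- put the A side together ----
theorem coins_brute_eq_sqrt (n : Int) : coins_brute n = (Nat.sqrt n.toNat : Int) := by
  by_cases hneg : n < 0
  · have h1 : (n + 1).toNat = 0 := by omega
    have h2 : n.toNat = 0 := by omega
    simp [coins_brute, h1, h2, PySem.List.pyRange_one_eq_nil (by omega : n + 1 ≤ 1),
      PySem.List.slice_from_one]
  · rw [Int.not_lt] at hneg
    set N := n.toNat with hN
    have hNn : (N : Int) = n := by omega
    set coin0 : Array Int := Array.replicate (n + 1).toNat 0 with hc0
    have hlen0 : coin0.size = N + 1 := by rw [hc0]; simp; omega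
    set final := (PySem.List.pyRange 1 (n + 1) 1).foldl (fun c i => pvFlipRun n i i c) coin0 with hfin
    have hlenf : final.size = N + 1 := by rw [hfin, foldl_flip_size, hlen0]
    have hpt : ∀ j : Nat, j < N + 1 →
        final.getD j 0 = (if Odd (Nat.divisors j).card then (1 : Int) else 0) := by
      intro j hj
      rw [hfin, foldl_flip_getD n _ coin0
        (fun i hi => (PySem.List.mem_pyRange_one.1 hi).1) j (by omega)]
      have h00 : coin0.getD j 0 = 0 := by
        rw [hc0, Array.getD_eq_getD_getElem?, Array.getElem?_replicate]
        split <;> rfl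
      have hcnt : (PySem.List.pyRange 1 (n + 1) 1).countP
          (fun i => decide (i ≤ (j : Int) ∧ (j : Int) ≤ n ∧ i ∣ ((j : Int) - i)))
          = (Nat.divisors j).card := by
        rw [PySem.List.pyRange_one, List.countP_map]
        have hNN : ((n + 1) - 1).toNat = N := by omega
        rw [hNN]
        by_cases hj0 : j = 0
        · subst hj0
          rw [Nat.divisors_zero]
          simp only [Finset.card_empty]
          apply List.countP_eq_zero.2
          intro k hk
          simp only [Function.comp_apply, decide_eq_true_eq, not_and]
          intro hle
          exfalso
          have : (1 : Int) + k ≤ 0 := by exact_mod_cast hle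
          have : (0 : Int) ≤ k := by positivity
          omega
        · have hcong : ∀ k ∈ List.range N,
              ((fun i => decide (i ≤ (j : Int) ∧ (j : Int) ≤ n ∧ i ∣ ((j : Int) - i))) ∘
                (fun k : Nat => (1 : Int) + k)) k
              = true ↔ (fun k => decide (k + 1 ≤ j ∧ (k + 1) ∣ j)) k = true := by
            intro k hk
            have hkN : k < N := List.mem_range.1 hk
            simp only [Function.comp_apply, decide_eq_true_eq]
            constructor
            · rintro ⟨hle, -, hdvd⟩
              have hdvd2 : (1 + (k : Int)) ∣ (j : Int) := by
                have he : (j : Int) = ((j : Int) - (1 + k)) + (1 + k) := by ring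
                rw [he]; exact dvd_add hdvd (dvd_refl _)
              have hc1 : ((k + 1 : Nat) : Int) = 1 + (k : Int) := by push_cast; ring
              refine ⟨by omega, ?_⟩
              rw [← Int.natCast_dvd_natCast, hc1]
              exact hdvd2
            · rintro ⟨hle, hdvd⟩
              have hc1 : ((k + 1 : Nat) : Int) = 1 + (k : Int) := by push_cast; ring
              have hdvd2 : (1 + (k : Int)) ∣ (j : Int) := by
                rw [← hc1]; exact_mod_cast hdvd
              refine ⟨by omega, by omega, ?_⟩
              have he : (j : Int) - (1 + k) = (j : Int) + (-1) * (1 + k) := by ring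
              rw [he]
              exact dvd_add hdvd2 (Dvd.dvd.mul_left (dvd_refl _) _)
          rw [List.countP_congr hcong,
            countP_range_eq_card_filter N (fun k => k + 1 ≤ j ∧ (k + 1) ∣ j),
            card_filter_range_succ N (fun i => i ≤ j ∧ i ∣ j)]
          exact count_divisors N j (by omega) (by omega)
      rw [hcnt, h00]
      split <;> norm_num
    have hmap : final.toList = (List.range (N + 1)).map
        (fun j => if Odd (Nat.divisors j).card then (1 : Int) else 0) := by
      apply List.ext_getElem (by simp [hlenf])
      intro j hj1 hj2
      have hjs : j < final.size := by simpa using hj1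
      have hjN : j < N + 1 := by omega
      have hgd : final.getD j 0 = final[j] := by
        rw [Array.getD_eq_getD_getElem?, Array.getElem?_eq_getElem hjs]
        rfl
      rw [Array.getElem_toList hjs, ← hgd, hpt j hjN]
      simp
    show (PySem.List.slice final.toList (some 1) none).sum = (Nat.sqrt n.toNat : Int)
    rw [PySem.List.slice_from_one, hmap, List.range_succ_eq_map]
    simp only [List.map_cons, List.tail_cons, List.map_map]
    have hform : ((fun j : Nat => if Odd (Nat.divisors j).card then (1 : Int) else 0) ∘ Nat.succ)
        = (fun k : Nat => if (fun k : Nat => decide (Odd (Nat.divisors (k + 1)).card)) k = true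
            then (1 : Int) else 0) := by
      funext k
      simp [Function.comp, Nat.succ_eq_add_one]
    rw [hform, PySem.List.sum_map_ite_one_zero]
    rw [countP_range_eq_card_filter N (fun k => Odd (Nat.divisors (k + 1)).card),
      card_filter_range_succ N (fun j => Odd (Nat.divisors j).card)]
    have hfil : (Finset.Icc 1 N).filter (fun j => Odd (Nat.divisors j).card)
        = (Finset.Icc 1 N).filter (fun j => IsSquare j) := by
      apply Finset.filter_congr
      intro j hj
      have h1 : 1 ≤ j := (Finset.mem_Icc.1 hj).1
      simp [odd_card_divisors_iff j h1]
    rw [hfil, card_squares_Icc]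

-- ===== VERDICT (by name: the statement is the Claim_ definition above) =====
theorem coins_brute_spec : Claim_equal_coins_brute := by
  intro n _
  unfold Spec_coins_brute
  rw [coins_brute_eq_sqrt, alt_eq_sqrt]
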